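-- pv_equiv track=rewrite | github.com/arthurcouette/ff_app | ff_app.py | extract_destinations
-- ===== SOURCE A (Python) =====
-- from typing import List, Dict, Optional, Set, Tuple, Any
--
-- KNOWN_AIRPORTS = {"ORY", "ABJ", "FDF", "PTP", "RUN", "MRU", "DZA", "COO", "BKO",
--                   "NTE", "LYS", "MRS", "TNR", "JED", "PAR", "CDG", "BOD"}
--
-- def extract_destinations(rotation_code: str) -> Set[str]:
--     if not rotation_code:
--         return set()
--     destinations = set()
--     rotation_code = rotation_code.upper()
--     for apt in KNOWN_AIRPORTS:
--         if apt in rotation_code and apt != "ORY":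
--             destinations.add(apt)
--     return destinations
-- ===== SOURCE B (Python) =====
-- KNOWN_AIRPORTS = {"ORY", "ABJ", "FDF", "PTP", "RUN", "MRU", "DZA", "COO", "BKO",
--                   "NTE", "LYS", "MRS", "TNR", "JED", "PAR", "CDG", "BOD"}
--
-- def extract_destinations(rotation_code):
--     rotation_code = rotation_code.upper()
--     windows = {rotation_code[i:i + 3] for i in range(len(rotation_code) - 2)}
--     return (KNOWN_AIRPORTS & windows) - {"ORY"}
-- ===== Notes on version B (the rewrite author's own statement) =====
-- stated objective: alternative
-- what changed: Instead of scanning the string once per known airport (17 substring searches), B slides one length-3 window across the upper-cased string, collects all 3-char windows into a set, and returns its intersection with KNOWN_AIRPORTS minus {'ORY'}.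
import Mathlib
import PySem

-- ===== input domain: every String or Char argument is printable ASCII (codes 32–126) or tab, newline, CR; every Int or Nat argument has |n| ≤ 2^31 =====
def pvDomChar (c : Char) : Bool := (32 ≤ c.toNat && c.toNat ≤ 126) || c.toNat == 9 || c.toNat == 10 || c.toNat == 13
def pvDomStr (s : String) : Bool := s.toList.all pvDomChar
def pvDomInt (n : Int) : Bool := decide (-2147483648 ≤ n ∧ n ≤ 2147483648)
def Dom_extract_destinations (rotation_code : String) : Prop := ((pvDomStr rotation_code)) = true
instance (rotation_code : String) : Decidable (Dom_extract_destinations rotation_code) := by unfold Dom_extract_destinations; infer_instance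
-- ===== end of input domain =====

-- B replaces A's 17 per-airport substring scans by one pass collecting all length-3
-- windows into a set and intersecting it with the known airports (alternative algorithm).


-- the module-level constant KNOWN_AIRPORTS (a Python set literal, all elements distinct)
def knownAirports : PySem.Set String :=
  PySem.Set.ofList ["ORY", "ABJ", "FDF", "PTP", "RUN", "MRU", "DZA", "COO", "BKO",
                    "NTE", "LYS", "MRS", "TNR", "JED", "PAR", "CDG", "BOD"]

-- ===== PORT A =====
def extract_destinations (rotation_code : String) : List String :=
  if rotation_code = "" then PySem.Set.empty
  else
    let rc := PySem.Str.upper rotation_code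
    knownAirports.foldl
      (fun destinations apt =>
        if PySem.Str.isIn apt rc && (apt != "ORY") then PySem.Set.add destinations apt
        else destinations)
      PySem.Set.empty

-- ===== PORT B =====
def extract_destinations_alt (rotation_code : String) : List String :=
  let rc := PySem.Str.upper rotation_code
  let windows : PySem.Set String :=
    PySem.Set.ofList ((PySem.List.pyRange 0 (PySem.Str.len rc - 2) 1).map
      (fun i => PySem.Str.slice rc (some i) (some (i + 3))))
  PySem.Set.diff (PySem.Set.inter knownAirports windows) (PySem.Set.ofList ["ORY"])

-- ===== PRECONDITION & SPEC =====
def Spec_extract_destinations (rotation_code : String) (out : List String) : Prop := out = extract_destinations_alt rotation_code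
instance (rotation_code : String) (out : List String) : Decidable (Spec_extract_destinations rotation_code out) := by unfold Spec_extract_destinations; infer_instance

-- ===== CLAIM (what is proved, stated in full; the proofs are below) =====
def Claim_equal_extract_destinations : Prop := ∀ (rotation_code : String), Dom_extract_destinations rotation_code → Spec_extract_destinations rotation_code (extract_destinations rotation_code)

-- ===== LEMMAS AND PROOFS =====

-- A's loop "if test: destinations.add(apt)" over a duplicate-free list is a filter
theorem foldl_add_eq_filter (p : String → Bool) :
    ∀ (l acc : List String), l.Nodup → (∀ x ∈ l, x ∉ acc) →
      l.foldl (fun d x => if p x then PySem.Set.add d x else d) acc = acc ++ l.filter p := by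
  intro l
  induction l with
  | nil => intro acc _ _; simp
  | cons a t ih =>
    intro acc hnd hdisj
    have hna : a ∉ acc := hdisj a (by simp)
    by_cases hpa : p a = true
    · have hadd : PySem.Set.add acc a = acc ++ [a] := PySem.Set.add_of_not_mem hna
      rw [List.foldl_cons, if_pos hpa, hadd,
          ih (acc ++ [a]) hnd.of_cons ?_]
      · simp [hpa]
      · intro x hx
        simp only [List.mem_append, List.mem_singleton]
        rintro (h | rfl)
        · exact hdisj x (by simp [hx]) h
        · exact (List.nodup_cons.mp hnd).1 hx
    · rw [List.foldl_cons, if_neg hpa,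
          ih acc hnd.of_cons (fun x hx => hdisj x (by simp [hx]))]
      simp [hpa]

-- a length-3 string is a substring of rc iff it is one of rc's length-3 window slices
theorem mem_windows_iff (rc a : String) (h3 : a.toList.length = 3) :
    (a ∈ (PySem.List.pyRange 0 (PySem.Str.len rc - 2) 1).map
        (fun i => PySem.Str.slice rc (some i) (some (i + 3)))) ↔
      a.toList <:+: rc.toList := by
  constructor
  · intro ha
    rcases List.mem_map.mp ha with ⟨i, hi, hslice⟩
    rcases (PySem.List.mem_pyRange_one).mp hi with ⟨hi0, hilt⟩
    have hk : ∃ k : Nat, (i : Int) = (k : Int) := ⟨i.toNat, (Int.toNat_of_nonneg hi0).symm⟩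
    rcases hk with ⟨k, rfl⟩
    have : a.toList = (rc.toList.drop k).take 3 := by
      rw [← hslice, PySem.Str.toList_slice, PySem.Chars.slice_eq_listSlice]
      have : ((k : Int) + 3) = ((k : Int) + ((3 : Nat) : Int)) := by norm_num
      rw [this, PySem.List.slice_natCast_add]
    rw [this]
    exact ((List.take_prefix 3 (rc.toList.drop k)).isInfix).trans
      ((List.drop_suffix k rc.toList).isInfix)
  · intro hinf
    rcases hinf with ⟨pre, suf, hps⟩
    refine List.mem_map.mpr ⟨(pre.length : Int), ?_, ?_⟩
    · refine (PySem.List.mem_pyRange_one).mpr ⟨by positivity, ?_⟩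
      have hlen : rc.toList.length = pre.length + 3 + suf.length := by
        rw [← hps]; simp [h3]; omega
      have : (PySem.Str.len rc) = ((rc.toList.length : Int)) := by
        simp [PySem.Str.len]
      rw [this, hlen]
      push_cast
      omega
    · apply String.toList_inj.mp
      rw [PySem.Str.toList_slice, PySem.Chars.slice_eq_listSlice]
      have h3' : ((pre.length : Int) + 3) = ((pre.length : Int) + ((3 : Nat) : Int)) := by norm_num
      rw [h3', PySem.List.slice_natCast_add]
      have hdrop : rc.toList.drop pre.length = a.toList ++ suf := by
        rw [← hps, List.append_assoc, List.drop_left]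
      rw [hdrop, ← h3, List.take_left]

-- ===== VERDICT (by name: the statement is the Claim_ definition above) =====
theorem extract_destinations_spec : Claim_equal_extract_destinations := by
  unfold Claim_equal_extract_destinations
  intro s _
  unfold Spec_extract_destinations
  by_cases hs : s = ""
  · subst hs; decide
  · have key : ∀ rc : String,
        knownAirports.foldl
          (fun d apt => if PySem.Str.isIn apt rc && (apt != "ORY") then PySem.Set.add d apt else d)
          PySem.Set.empty =
        PySem.Set.diff
          (PySem.Set.inter knownAirports
            (PySem.Set.ofList ((PySem.List.pyRange 0 (PySem.Str.len rc - 2) 1).map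
              (fun i => PySem.Str.slice rc (some i) (some (i + 3))))))
          (PySem.Set.ofList ["ORY"]) := by
      intro rc
      rw [show (PySem.Set.empty : PySem.Set String) = ([] : List String) from rfl,
          foldl_add_eq_filter _ knownAirports [] (by decide) (by simp), List.nil_append]
      unfold PySem.Set.diff PySem.Set.inter
      rw [List.filter_filter]
      apply List.filter_congr
      intro a ha
      have h3 : a.toList.length = 3 := by fin_cases ha <;> decide
      have hiff : PySem.Str.isIn a rc =
          ((PySem.Set.ofList ((PySem.List.pyRange 0 (PySem.Str.len rc - 2) 1).map
              (fun i => PySem.Str.slice rc (some i) (some (i + 3))))).contains a) := by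
        rw [Bool.eq_iff_iff, PySem.Str.isIn_iff_infix, PySem.Set.contains_iff,
            PySem.Set.mem_ofList]
        exact (mem_windows_iff rc a h3).symm
      rw [hiff, Bool.eq_iff_iff]
      simp [PySem.Set.mem_ofList, and_comm]
    unfold extract_destinations extract_destinations_alt
    rw [if_neg hs]
    exact key (PySem.Str.upper s)
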